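-- pv_equiv track=rewrite | github.com/Hosseinshisfahani/psychology-institute-platform | blog/templatetags/jalali_filters.py | persian_number
-- ===== SOURCE A (Python) =====
-- def persian_number(number):
--     """
--     Convert English numbers to Persian numbers
--     """
--     if number is None:
--         return ''
--
--     persian_digits = '۰۱۲۳۴۵۶۷۸۹'
--     english_digits = '0123456789'
--
--     number_str = str(number)
--     for i, digit in enumerate(english_digits):
--         number_str = number_str.replace(digit, persian_digits[i])
--
--     return number_str
-- ===== SOURCE B (Python) =====
-- _PERSIAN = dict(zip('0123456789', '۰۱۲۳۴۵۶۷۸۹'))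
--
--
-- def persian_number(number):
--     """
--     Convert English numbers to Persian numbers
--     """
--     if number is None:
--         return ''
--     return ''.join(_PERSIAN.get(c, c) for c in str(number))
-- ===== Notes on version B (the rewrite author's own statement) =====
-- stated objective: idiomatic
-- what changed: A rewrites the whole string ten times, once per digit of the English alphabet; B builds a digit-translation dict once and makes a single pass over the input's characters, emitting mapping.get(c, c) and joining.
import Mathlib
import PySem

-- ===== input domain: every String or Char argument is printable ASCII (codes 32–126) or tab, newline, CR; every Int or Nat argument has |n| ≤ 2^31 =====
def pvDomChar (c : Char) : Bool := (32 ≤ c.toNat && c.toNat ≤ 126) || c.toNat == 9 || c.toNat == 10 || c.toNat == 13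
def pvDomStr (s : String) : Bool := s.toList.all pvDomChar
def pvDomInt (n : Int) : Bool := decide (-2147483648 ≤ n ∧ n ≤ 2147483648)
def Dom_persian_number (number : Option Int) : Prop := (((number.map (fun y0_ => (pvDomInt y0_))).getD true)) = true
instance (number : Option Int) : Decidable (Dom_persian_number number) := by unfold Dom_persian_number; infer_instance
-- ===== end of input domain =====

-- B replaces A's ten whole-string replace passes (one per English digit) by one
-- character-level pass over the input with a digit-translation dict; same result, idiomatic.

-- ===== PORT A =====
def persian_number (number : Option Int) : String :=
  match number with
  | none => ""
  | some n =>
    let persian_digits : String := "۰۱۲۳۴۵۶۷۸۹"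
    let english_digits : String := "0123456789"
    (PySem.List.enumerate english_digits.toList 0).foldl
      (fun number_str p =>
        PySem.Str.replace number_str (String.ofList [p.2])
          (String.ofList [PySem.List.pyGetD persian_digits.toList p.1 ' ']))
      (PySem.Int.toStr n)

-- ===== PORT B =====
def pnMap : PySem.Dict Char Char :=
  PySem.Dict.ofList (List.zip "0123456789".toList "۰۱۲۳۴۵۶۷۸۹".toList)

def persian_number_alt (number : Option Int) : String :=
  match number with
  | none => ""
  | some n =>
    String.ofList ((PySem.Int.toChars n).map (fun c => PySem.Dict.getD pnMap c c))

-- ===== PRECONDITION & SPEC =====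
def Spec_persian_number (number : Option Int) (out : String) : Prop := out = persian_number_alt number
instance (number : Option Int) (out : String) : Decidable (Spec_persian_number number out) := by unfold Spec_persian_number; infer_instance

-- ===== CLAIM (what is proved, stated in full; the proofs are below) =====
def Claim_equal_persian_number : Prop := ∀ (number : Option Int), Dom_persian_number number → Spec_persian_number number (persian_number number)

-- ===== LEMMAS AND PROOFS =====

-- single-character replace is a map over the characters
theorem replace_go_single (d p : Char) : ∀ (fuel : Nat) (l acc : List Char), l.length ≤ fuel →
    PySem.Chars.replace.go [d] [p] fuel l acc
      = acc.reverse ++ l.map (fun c => if c = d then p else c) := by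
  intro fuel
  induction fuel with
  | zero =>
    intro l acc h
    have : l = [] := List.eq_nil_of_length_eq_zero (Nat.le_zero.mp h)
    subst this; simp [PySem.Chars.replace.go]
  | succ f ih =>
    intro l acc h
    cases l with
    | nil => simp [PySem.Chars.replace.go]
    | cons c t =>
      simp only [PySem.Chars.replace.go]
      by_cases hc : c = d
      · subst hc
        have hpre : List.isPrefixOf [c] (c :: t) = true := by simp [List.isPrefixOf]
        rw [if_pos hpre]
        simp only [List.length_cons, List.length_nil, List.drop_succ_cons, List.drop_zero] at *
        rw [ih _ _ (by omega)]
        simp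
      · have hpre : List.isPrefixOf [d] (c :: t) = false := by
          simp [List.isPrefixOf]; exact fun hdc => (hc hdc.symm).elim
        rw [if_neg (by simp [hpre])]
        simp only [List.length_cons] at h
        rw [ih _ _ (by omega)]
        simp [hc]

theorem replace_single (s : List Char) (d p : Char) :
    PySem.Chars.replace s [d] [p] = s.map (fun c => if c = d then p else c) := by
  rw [PySem.Chars.replace]
  simp only [List.isEmpty_cons, if_false, Bool.false_eq_true]
  simpa using replace_go_single d p s.length s [] (le_refl _)

theorem str_replace_single (s : String) (d p : Char) :
    PySem.Str.replace s (String.ofList [d]) (String.ofList [p])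
      = String.ofList (s.toList.map (fun c => if c = d then p else c)) := by
  rw [PySem.Str.replace]
  simp [replace_single]

-- the ten successive single-char substitutions agree pointwise with the dict lookup
theorem chain_eq_lookup (c : Char) :
    (fun c => if c = '9' then '۹' else c)
    ((fun c => if c = '8' then '۸' else c)
    ((fun c => if c = '7' then '۷' else c)
    ((fun c => if c = '6' then '۶' else c)
    ((fun c => if c = '5' then '۵' else c)
    ((fun c => if c = '4' then '۴' else c)
    ((fun c => if c = '3' then '۳' else c)
    ((fun c => if c = '2' then '۲' else c)
    ((fun c => if c = '1' then '۱' else c)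
    ((fun c => if c = '0' then '۰' else c) c)))))))))
      = PySem.Dict.getD pnMap c c := by
  by_cases h0 : c = '0'; · subst h0; decide
  by_cases h1 : c = '1'; · subst h1; decide
  by_cases h2 : c = '2'; · subst h2; decide
  by_cases h3 : c = '3'; · subst h3; decide
  by_cases h4 : c = '4'; · subst h4; decide
  by_cases h5 : c = '5'; · subst h5; decide
  by_cases h6 : c = '6'; · subst h6; decide
  by_cases h7 : c = '7'; · subst h7; decide
  by_cases h8 : c = '8'; · subst h8; decide
  by_cases h9 : c = '9'; · subst h9; decide
  simp only [if_neg h0, if_neg h1, if_neg h2, if_neg h3, if_neg h4, if_neg h5,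
    if_neg h6, if_neg h7, if_neg h8, if_neg h9]
  have hm : pnMap = PySem.Dict.mk [('0','۰'),('1','۱'),('2','۲'),('3','۳'),('4','۴'),('5','۵'),('6','۶'),('7','۷'),('8','۸'),('9','۹')] := by decide
  have : PySem.Dict.get? pnMap c = none := by
    rw [hm]
    simp [PySem.Dict.get?, Ne.symm h0, Ne.symm h1, Ne.symm h2, Ne.symm h3, Ne.symm h4, Ne.symm h5, Ne.symm h6, Ne.symm h7, Ne.symm h8, Ne.symm h9]
  simp [PySem.Dict.getD, this]

theorem pn_g0 : PySem.List.pyGetD ("۰۱۲۳۴۵۶۷۸۹".toList) (0:Int) ' ' = '۰' := by decide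
theorem pn_g1 : PySem.List.pyGetD ("۰۱۲۳۴۵۶۷۸۹".toList) (1:Int) ' ' = '۱' := by decide
theorem pn_g2 : PySem.List.pyGetD ("۰۱۲۳۴۵۶۷۸۹".toList) (2:Int) ' ' = '۲' := by decide
theorem pn_g3 : PySem.List.pyGetD ("۰۱۲۳۴۵۶۷۸۹".toList) (3:Int) ' ' = '۳' := by decide
theorem pn_g4 : PySem.List.pyGetD ("۰۱۲۳۴۵۶۷۸۹".toList) (4:Int) ' ' = '۴' := by decide
theorem pn_g5 : PySem.List.pyGetD ("۰۱۲۳۴۵۶۷۸۹".toList) (5:Int) ' ' = '۵' := by decide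
theorem pn_g6 : PySem.List.pyGetD ("۰۱۲۳۴۵۶۷۸۹".toList) (6:Int) ' ' = '۶' := by decide
theorem pn_g7 : PySem.List.pyGetD ("۰۱۲۳۴۵۶۷۸۹".toList) (7:Int) ' ' = '۷' := by decide
theorem pn_g8 : PySem.List.pyGetD ("۰۱۲۳۴۵۶۷۸۹".toList) (8:Int) ' ' = '۸' := by decide
theorem pn_g9 : PySem.List.pyGetD ("۰۱۲۳۴۵۶۷۸۹".toList) (9:Int) ' ' = '۹' := by decide

theorem pn_enum : PySem.List.enumerate ("0123456789".toList) 0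
    = [((0:Int),'0'),(1,'1'),(2,'2'),(3,'3'),(4,'4'),(5,'5'),(6,'6'),(7,'7'),(8,'8'),(9,'9')] := by
  decide

theorem map_chain (l : List Char) :
    ((((((((((l.map (fun c => if c = '0' then '۰' else c)).map
      (fun c => if c = '1' then '۱' else c)).map
      (fun c => if c = '2' then '۲' else c)).map
      (fun c => if c = '3' then '۳' else c)).map
      (fun c => if c = '4' then '۴' else c)).map
      (fun c => if c = '5' then '۵' else c)).map
      (fun c => if c = '6' then '۶' else c)).map
      (fun c => if c = '7' then '۷' else c)).map
      (fun c => if c = '8' then '۸' else c)).map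
      (fun c => if c = '9' then '۹' else c))
      = l.map (fun c => PySem.Dict.getD pnMap c c) := by
  induction l with
  | nil => rfl
  | cons c t ih =>
    simp only [List.map_cons]
    exact congrArg₂ List.cons (chain_eq_lookup c) ih

set_option maxHeartbeats 2000000 in
theorem persian_number_some (n : Int) :
    persian_number (some n) = persian_number_alt (some n) := by
  simp only [persian_number, persian_number_alt, pn_enum, List.foldl_cons, List.foldl_nil]
  simp only [pn_g0, pn_g1, pn_g2, pn_g3, pn_g4, pn_g5, pn_g6, pn_g7, pn_g8, pn_g9]
  simp only [str_replace_single, String.toList_ofList, PySem.Int.toList_toStr]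
  rw [map_chain]

-- ===== VERDICT (by name: the statement is the Claim_ definition above) =====
theorem persian_number_spec : Claim_equal_persian_number := by
  intro number _
  unfold Spec_persian_number
  cases number with
  | none => rfl
  | some n => exact persian_number_some n
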